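-- pv_equiv track=rewrite | github.com/MarinaSudakova/Python_Seminar | Lesson_5/Task_2.py | range_nums
-- ===== SOURCE A (Python) =====
-- def range_nums(new_list: list):
--     range_list = []
--     for i in range(len(new_list)):
--         f = new_list[i]
--         list_new =[f]
--         for g in range(i + 1, len(new_list)):
--             if new_list[g] > f:
--                 f = new_list[g]
--                 list_new.append(f)
--         if len(list_new) > 1:
--             range_list.append(list_new)
--     return range_list
-- ===== SOURCE B (Python) =====
-- def range_nums(new_list: list):
--     n = len(new_list)
--     R = [None] * n
--     for i in range(n - 1, -1, -1):
--         nxt = R[i + 1] if i + 1 < n else []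
--         R[i] = [new_list[i]] + [x for x in nxt if x > new_list[i]]
--     return [r for r in R if len(r) > 1]
-- ===== Notes on version B (the rewrite author's own statement) =====
-- stated objective: alternative
-- what changed: B builds suffix record-maxima lists right-to-left, deriving each from the next suffix's list by filtering (reuse instead of rescanning), then filters by length; A rescans the whole suffix for every index.
import Mathlib
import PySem

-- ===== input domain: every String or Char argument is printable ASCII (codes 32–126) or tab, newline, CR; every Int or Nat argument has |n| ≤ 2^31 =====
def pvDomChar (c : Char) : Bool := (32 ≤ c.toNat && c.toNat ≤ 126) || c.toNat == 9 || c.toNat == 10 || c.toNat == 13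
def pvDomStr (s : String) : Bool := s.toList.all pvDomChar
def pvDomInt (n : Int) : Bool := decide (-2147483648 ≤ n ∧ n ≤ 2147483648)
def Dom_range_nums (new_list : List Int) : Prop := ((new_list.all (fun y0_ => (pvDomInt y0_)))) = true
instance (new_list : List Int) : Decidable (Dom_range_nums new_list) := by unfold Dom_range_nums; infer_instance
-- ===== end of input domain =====

-- B computes the same successive-record-maxima lists right to left, deriving each suffix record list from the next one by filtering instead of rescanning the suffix (alternative decomposition; return value only, no mutation).


-- ===== PORT A =====
-- Literal port of A: outer loop over indices, inner rescan of the suffix building the record list.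
def range_nums (new_list : List Int) : List (List Int) :=
  (PySem.List.pyRange 0 (new_list.length : Int) 1).foldl (fun range_list i =>
    let f := PySem.List.pyGetD new_list i 0
    let st := (PySem.List.pyRange (i + 1) (new_list.length : Int) 1).foldl
      (fun (st : Int × List Int) g =>
        let x := PySem.List.pyGetD new_list g 0
        if st.1 < x then (x, st.2 ++ [x]) else st) (f, [f])
    if st.2.length > 1 then range_list ++ [st.2] else range_list) []

-- ===== PORT B =====
-- B fills the suffix record lists right to left: the record list at i is the element at i
-- followed by the next suffix's record list filtered to values above it (Source B's R array).
def suffixRecords : List Int → List (List Int)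
  | [] => []
  | a :: rest =>
    let Rs := suffixRecords rest
    (a :: (Rs.headD []).filter (fun x => a < x)) :: Rs

def range_nums_alt (new_list : List Int) : List (List Int) :=
  (suffixRecords new_list).filter (fun r => r.length > 1)

-- ===== PRECONDITION & SPEC =====
def Spec_range_nums (new_list : List Int) (out : List (List Int)) : Prop := out = range_nums_alt new_list
instance (new_list : List Int) (out : List (List Int)) : Decidable (Spec_range_nums new_list out) := by unfold Spec_range_nums; infer_instance

-- ===== CLAIM (what is proved, stated in full; the proofs are below) =====
def Claim_equal_range_nums : Prop := ∀ (new_list : List Int), Dom_range_nums new_list → Spec_range_nums new_list (range_nums new_list)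

-- ===== LEMMAS AND PROOFS =====

-- tail of the record-maxima list of a suffix, given the running maximum a
def recsT (a : Int) : List Int → List Int
  | [] => []
  | x :: xs => if a < x then x :: recsT x xs else recsT a xs

theorem recsT_gt : ∀ (xs : List Int) (x y : Int), y ∈ recsT x xs → x < y := by
  intro xs
  induction xs with
  | nil => intro x y h; simp [recsT] at h
  | cons z zs ih =>
    intro x y h
    simp only [recsT] at h
    split at h
    · rcases List.mem_cons.mp h with h | h
      · omega
      · have := ih z y h; omega
    · exact ih x y h

theorem filter_recsT : ∀ (xs : List Int) (x a : Int),
    (x :: recsT x xs).filter (fun y => a < y) = recsT a (x :: xs) := by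
  intro xs
  induction xs with
  | nil =>
    intro x a
    by_cases h : a < x <;> simp [recsT, h]
  | cons y ys ih =>
    intro x a
    by_cases hxy : x < y
    · by_cases hax : a < x
      · have hay : a < y := by omega
        have hall : ∀ z ∈ recsT y ys, a < z := by
          intro z hz; have := recsT_gt ys y z hz; omega
        simp [recsT, hxy, hax, hay,
          List.filter_eq_self.mpr (fun z hz => decide_eq_true (hall z hz))]
      · have h1 := ih y a
        have h2 : recsT x (y :: ys) = y :: recsT y ys := by simp [recsT, hxy]
        rw [h2, List.filter_cons]
        simp only [hax, decide_false]
        rw [h1]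
        simp [recsT, hax]
    · have h1 := ih x a
      have h2 : recsT x (y :: ys) = recsT x ys := by simp [recsT, hxy]
      rw [h2, h1]
      by_cases hax : a < x
      · simp [recsT, hax, hxy]
      · have hay : ¬ a < y := by omega
        simp [recsT, hax, hay]

theorem suffixRecords_cons : ∀ (rest : List Int) (a : Int),
    suffixRecords (a :: rest) = (a :: recsT a rest) :: suffixRecords rest := by
  intro rest
  induction rest with
  | nil => intro a; simp [suffixRecords, recsT]
  | cons x xs ih =>
    intro a
    rw [show suffixRecords (a :: x :: xs)
        = (a :: ((suffixRecords (x :: xs)).headD []).filter (fun z => a < z))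
          :: suffixRecords (x :: xs) from rfl]
    rw [ih x, List.headD_cons, filter_recsT xs x a]

theorem inner_fold_snd : ∀ (xs : List Int) (a : Int) (acc : List Int),
    (xs.foldl (fun (st : Int × List Int) x =>
      if st.1 < x then (x, st.2 ++ [x]) else st) (a, acc)).2 = acc ++ recsT a xs := by
  intro xs
  induction xs with
  | nil => intro a acc; simp [recsT]
  | cons x xs ih =>
    intro a acc
    simp only [List.foldl_cons, recsT]
    by_cases h : a < x
    · simp only [h, if_true]
      rw [ih x (acc ++ [x])]
      simp
    · simp only [h, if_false]
      rw [ih a acc]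

-- A's outer body, after reducing python indexing to list operations
def stepN (l : List Int) (acc : List (List Int)) (i : Nat) : List (List Int) :=
  let f := l.getD i 0
  let st := ((l.drop (i + 1)).foldl (fun (st : Int × List Int) x =>
      if st.1 < x then (x, st.2 ++ [x]) else st) (f, [f]))
  if st.2.length > 1 then acc ++ [st.2] else acc

theorem range_nums_eq_stepN (l : List Int) :
    range_nums l = (List.range l.length).foldl (stepN l) [] := by
  unfold range_nums
  rw [PySem.List.pyRange_zero_nat, List.foldl_map]
  congr 1
  funext acc i
  have hfold := PySem.List.foldl_pyRange_pyGetD' l 0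
    (fun (st : Int × List Int) x => if st.1 < x then (x, st.2 ++ [x]) else st)
    ((l.getD i 0, [l.getD i 0]) : Int × List Int) (a := (i : Int) + 1) (by omega)
  have htn : ((i : Int) + 1).toNat = i + 1 := by omega
  rw [htn] at hfold
  simp only [stepN, PySem.List.pyGetD_natCast]
  rw [← hfold]

theorem stepN_shift (a : Int) (rest : List Int) (acc : List (List Int)) (i : Nat) :
    stepN (a :: rest) acc (i + 1) = stepN rest acc i := by
  simp [stepN]

theorem outer_fold (l : List Int) : ∀ (acc : List (List Int)),
    (List.range l.length).foldl (stepN l) acc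
      = acc ++ (suffixRecords l).filter (fun r => r.length > 1) := by
  induction l with
  | nil => intro acc; simp [suffixRecords]
  | cons a rest ih =>
    intro acc
    rw [List.length_cons, List.range_succ_eq_map, List.foldl_cons, List.foldl_map]
    have hfun : (fun (acc : List (List Int)) (i : Nat) => stepN (a :: rest) acc (Nat.succ i))
        = stepN rest := by
      funext acc i
      exact stepN_shift a rest acc i
    rw [hfun, ih, suffixRecords_cons rest a]
    have hsnd : ((rest.foldl (fun (st : Int × List Int) x =>
        if st.1 < x then (x, st.2 ++ [x]) else st) (a, [a])).2) = a :: recsT a rest := by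
      rw [inner_fold_snd rest a [a]]; rfl
    have hstep : stepN (a :: rest) acc 0
        = acc ++ List.filter (fun r => r.length > 1) [a :: recsT a rest] := by
      simp only [stepN, List.getD_cons_zero, Nat.zero_add, List.drop_succ_cons, List.drop_zero,
        hsnd, List.filter_cons, List.filter_nil]
      by_cases h : 0 < (recsT a rest).length <;> simp [h]
    rw [hstep, List.append_assoc]
    congr 1
    rw [List.filter_cons]
    by_cases h : 0 < (recsT a rest).length <;> simp [h]

-- ===== VERDICT (by name: the statement is the Claim_ definition above) =====
theorem range_nums_spec : Claim_equal_range_nums := by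
  intro l _
  unfold Spec_range_nums range_nums_alt
  rw [range_nums_eq_stepN, outer_fold l []]
  rfl
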